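-- pv_equiv track=rewrite | github.com/NextCommunity/.github | scripts/leaderboard.py | prev_milestone
-- ===== SOURCE A (Python) =====
-- MILESTONES = [
--     10, 20, 30, 40, 50, 60, 70, 80, 90, 100,
--     150, 200, 250, 300, 400, 500, 750, 1000,
-- ]
--
-- def prev_milestone(commits):
--     """Return the last milestone at or below *commits*, or 0."""
--     prev = 0
--     for m in MILESTONES:
--         if m <= commits:
--             prev = m
--         else:
--             break
--     return prev
-- ===== SOURCE B (Python) =====
-- MILESTONES = [
--     10, 20, 30, 40, 50, 60, 70, 80, 90, 100,
--     150, 200, 250, 300, 400, 500, 750, 1000,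
-- ]
--
-- def prev_milestone(commits):
--     """Return the last milestone at or below *commits*, or 0."""
--     # hand-rolled bisect_right (A imports nothing, so no bisect module)
--     lo, hi = 0, len(MILESTONES)
--     while lo < hi:
--         mid = (lo + hi) // 2
--         if MILESTONES[mid] <= commits:
--             lo = mid + 1
--         else:
--             hi = mid
--     return MILESTONES[lo - 1] if lo else 0
-- ===== Notes on version B (the rewrite author's own statement) =====
-- stated objective: alternative
-- what changed: Replaces the linear early-break scan over MILESTONES with a hand-written bisect_right binary search on the sorted list, returning MILESTONES[i-1] for the insertion point i (0 if i==0).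
import Mathlib
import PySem

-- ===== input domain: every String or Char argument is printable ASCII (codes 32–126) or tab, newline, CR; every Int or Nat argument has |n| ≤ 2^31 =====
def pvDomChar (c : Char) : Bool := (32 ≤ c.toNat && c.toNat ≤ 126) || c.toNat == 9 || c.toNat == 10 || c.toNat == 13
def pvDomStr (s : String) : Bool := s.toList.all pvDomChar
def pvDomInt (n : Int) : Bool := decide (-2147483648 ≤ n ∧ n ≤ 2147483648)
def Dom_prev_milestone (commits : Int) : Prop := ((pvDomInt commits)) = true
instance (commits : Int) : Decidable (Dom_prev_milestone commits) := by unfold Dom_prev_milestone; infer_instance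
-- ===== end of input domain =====

-- B replaces A's linear early-break scan with a hand-written bisect_right binary search (alternative algorithm, same results).


def MILESTONES : List Int :=
  [10, 20, 30, 40, 50, 60, 70, 80, 90, 100,
   150, 200, 250, 300, 400, 500, 750, 1000]

-- ===== PORT A =====
-- the for-loop with break, as structural recursion over the list with accumulator `prev`
def prevLoopA (commits : Int) : List Int → Int → Int
  | [], prev => prev
  | m :: rest, prev => if m ≤ commits then prevLoopA commits rest m else prev

def prev_milestone (commits : Int) : Int := prevLoopA commits MILESTONES 0

-- ===== PORT B =====
-- hand-written bisect_right loop from Source B (while lo < hi …); the fuel argument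
-- (initially the list length, an upper bound on the iteration count) only makes
-- the recursion structural — it is never exhausted while lo < hi
def bisectRightB (commits : Int) : Nat → Nat → Nat → Nat
  | 0, lo, _ => lo
  | fuel + 1, lo, hi =>
    if lo < hi then
      let mid := (lo + hi) / 2
      if MILESTONES.getD mid 0 ≤ commits then bisectRightB commits fuel (mid + 1) hi
      else bisectRightB commits fuel lo mid
    else lo

def prev_milestone_alt (commits : Int) : Int :=
  let lo := bisectRightB commits MILESTONES.length 0 MILESTONES.length
  if lo ≠ 0 then MILESTONES.getD (lo - 1) 0 else 0

-- ===== PRECONDITION & SPEC =====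
def Spec_prev_milestone (commits : Int) (out : Int) : Prop := out = prev_milestone_alt commits
instance (commits : Int) (out : Int) : Decidable (Spec_prev_milestone commits out) := by unfold Spec_prev_milestone; infer_instance

-- ===== CLAIM (what is proved, stated in full; the proofs are below) =====
def Claim_equal_prev_milestone : Prop := ∀ (commits : Int), Dom_prev_milestone commits → Spec_prev_milestone commits (prev_milestone commits)

-- ===== LEMMAS AND PROOFS =====

-- a list's getD is the default or a member
theorem getD_mem_cons (l : List Int) (i : Nat) (d : Int) : l.getD i d ∈ d :: l := by
  rcases Nat.lt_or_ge i l.length with h | h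
  · exact List.mem_cons_of_mem _ (by rw [List.getD_eq_getElem l d h]; exact List.getElem_mem h)
  · rw [List.getD_eq_default l d h]; exact List.mem_cons_self ..

-- A's loop only looks at the comparisons m ≤ commits for m in the list
theorem loopA_congr (c w : Int) (l : List Int) (p : Int)
    (h : ∀ m ∈ l, (m ≤ c ↔ m ≤ w)) : prevLoopA c l p = prevLoopA w l p := by
  induction l generalizing p with
  | nil => rfl
  | cons m rest ih =>
    simp only [prevLoopA]
    have hm := h m (List.mem_cons_self ..)
    have hr : ∀ x ∈ rest, (x ≤ c ↔ x ≤ w) := fun x hx => h x (List.mem_cons_of_mem _ hx)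
    by_cases hw : m ≤ w
    · rw [if_pos (hm.mpr hw), if_pos hw]; exact ih _ hr
    · rw [if_neg (fun hcc => hw (hm.mp hcc)), if_neg hw]

-- B's binary search only looks at the comparisons m ≤ commits for m in 0 :: MILESTONES
theorem bisect_congr (c w : Int) (h : ∀ m ∈ (0 : Int) :: MILESTONES, (m ≤ c ↔ m ≤ w)) :
    ∀ fuel lo hi, bisectRightB c fuel lo hi = bisectRightB w fuel lo hi := by
  intro fuel
  induction fuel with
  | zero => intro lo hi; rfl
  | succ f ih =>
    intro lo hi
    simp only [bisectRightB]
    by_cases hlt : lo < hi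
    · rw [if_pos hlt, if_pos hlt]
      have hmem := h (MILESTONES.getD ((lo + hi) / 2) 0) (getD_mem_cons ..)
      by_cases hw : MILESTONES.getD ((lo + hi) / 2) 0 ≤ w
      · rw [if_pos (hmem.mpr hw), if_pos hw]; exact ih ..
      · rw [if_neg (fun hcc => hw (hmem.mp hcc)), if_neg hw]; exact ih ..
    · rw [if_neg hlt, if_neg hlt]

theorem both_congr (c w : Int) (h : ∀ m ∈ (0 : Int) :: MILESTONES, (m ≤ c ↔ m ≤ w)) :
    prev_milestone c = prev_milestone w ∧ prev_milestone_alt c = prev_milestone_alt w := by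
  constructor
  · exact loopA_congr c w MILESTONES 0 (fun m hm => h m (List.mem_cons_of_mem _ hm))
  · unfold prev_milestone_alt
    rw [bisect_congr c w h]

-- ===== VERDICT (by name: the statement is the Claim_ definition above) =====
theorem prev_milestone_spec : Claim_equal_prev_milestone := by
  intro c _
  unfold Spec_prev_milestone
  have hkey := both_congr c
  by_cases hneg : c < 0
  · have h := hkey (-1) (by intro m hm; simp only [MILESTONES, List.mem_cons, List.not_mem_nil, or_false] at hm; omega); rw [h.1, h.2]; decide
  by_cases h0 : c < 10
  · have h := hkey 0 (by intro m hm; simp only [MILESTONES, List.mem_cons, List.not_mem_nil, or_false] at hm; omega); rw [h.1, h.2]; decide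
  by_cases h1 : c < 20
  · have h := hkey 10 (by intro m hm; simp only [MILESTONES, List.mem_cons, List.not_mem_nil, or_false] at hm; omega); rw [h.1, h.2]; decide
  by_cases h2 : c < 30
  · have h := hkey 20 (by intro m hm; simp only [MILESTONES, List.mem_cons, List.not_mem_nil, or_false] at hm; omega); rw [h.1, h.2]; decide
  by_cases h3 : c < 40
  · have h := hkey 30 (by intro m hm; simp only [MILESTONES, List.mem_cons, List.not_mem_nil, or_false] at hm; omega); rw [h.1, h.2]; decide
  by_cases h4 : c < 50
  · have h := hkey 40 (by intro m hm; simp only [MILESTONES, List.mem_cons, List.not_mem_nil, or_false] at hm; omega); rw [h.1, h.2]; decide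
  by_cases h5 : c < 60
  · have h := hkey 50 (by intro m hm; simp only [MILESTONES, List.mem_cons, List.not_mem_nil, or_false] at hm; omega); rw [h.1, h.2]; decide
  by_cases h6 : c < 70
  · have h := hkey 60 (by intro m hm; simp only [MILESTONES, List.mem_cons, List.not_mem_nil, or_false] at hm; omega); rw [h.1, h.2]; decide
  by_cases h7 : c < 80
  · have h := hkey 70 (by intro m hm; simp only [MILESTONES, List.mem_cons, List.not_mem_nil, or_false] at hm; omega); rw [h.1, h.2]; decide
  by_cases h8 : c < 90
  · have h := hkey 80 (by intro m hm; simp only [MILESTONES, List.mem_cons, List.not_mem_nil, or_false] at hm; omega); rw [h.1, h.2]; decide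
  by_cases h9 : c < 100
  · have h := hkey 90 (by intro m hm; simp only [MILESTONES, List.mem_cons, List.not_mem_nil, or_false] at hm; omega); rw [h.1, h.2]; decide
  by_cases h10 : c < 150
  · have h := hkey 100 (by intro m hm; simp only [MILESTONES, List.mem_cons, List.not_mem_nil, or_false] at hm; omega); rw [h.1, h.2]; decide
  by_cases h11 : c < 200
  · have h := hkey 150 (by intro m hm; simp only [MILESTONES, List.mem_cons, List.not_mem_nil, or_false] at hm; omega); rw [h.1, h.2]; decide
  by_cases h12 : c < 250
  · have h := hkey 200 (by intro m hm; simp only [MILESTONES, List.mem_cons, List.not_mem_nil, or_false] at hm; omega); rw [h.1, h.2]; decide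
  by_cases h13 : c < 300
  · have h := hkey 250 (by intro m hm; simp only [MILESTONES, List.mem_cons, List.not_mem_nil, or_false] at hm; omega); rw [h.1, h.2]; decide
  by_cases h14 : c < 400
  · have h := hkey 300 (by intro m hm; simp only [MILESTONES, List.mem_cons, List.not_mem_nil, or_false] at hm; omega); rw [h.1, h.2]; decide
  by_cases h15 : c < 500
  · have h := hkey 400 (by intro m hm; simp only [MILESTONES, List.mem_cons, List.not_mem_nil, or_false] at hm; omega); rw [h.1, h.2]; decide
  by_cases h16 : c < 750
  · have h := hkey 500 (by intro m hm; simp only [MILESTONES, List.mem_cons, List.not_mem_nil, or_false] at hm; omega); rw [h.1, h.2]; decide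
  by_cases h17 : c < 1000
  · have h := hkey 750 (by intro m hm; simp only [MILESTONES, List.mem_cons, List.not_mem_nil, or_false] at hm; omega); rw [h.1, h.2]; decide
  have h := hkey 1000 (by intro m hm; simp only [MILESTONES, List.mem_cons, List.not_mem_nil, or_false] at hm; omega); rw [h.1, h.2]; decide
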